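-- pv_equiv track=rewrite | github.com/OZTaekOppa/FastaHandler | scripts/sizeptrnsrch.py | is_fasta_file
-- ===== SOURCE A (Python) =====
-- def is_fasta_file(filename):
--     extensions = ['.fa', '.fasta', '.fna']
--     compressed_extensions = ['.fa.gz', '.fasta.gz', '.fna.gz',
--                              '.fa.bz2', '.fasta.bz2', '.fna.bz2',
--                              '.fa.zip', '.fasta.zip', '.fna.zip']
--     if any(filename.endswith(ext) for ext in extensions + compressed_extensions):
--         return True
--     else:
--         return False
-- ===== SOURCE B (Python) =====
-- def is_fasta_file(filename):
--     base = filename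
--     for comp in ('.gz', '.bz2', '.zip'):
--         if filename.endswith(comp):
--             base = filename[:-len(comp)]
--             break
--     return base.endswith(('.fa', '.fasta', '.fna'))
-- ===== Notes on version B (the rewrite author's own statement) =====
-- stated objective: simpler
-- what changed: Instead of testing the flat 12-element cross product of extensions x compressions with one any(), B strips at most one compression suffix ('.gz'/'.bz2'/'.zip') off the filename and then tests the base name against the 3 plain FASTA extensions.
import Mathlib
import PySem

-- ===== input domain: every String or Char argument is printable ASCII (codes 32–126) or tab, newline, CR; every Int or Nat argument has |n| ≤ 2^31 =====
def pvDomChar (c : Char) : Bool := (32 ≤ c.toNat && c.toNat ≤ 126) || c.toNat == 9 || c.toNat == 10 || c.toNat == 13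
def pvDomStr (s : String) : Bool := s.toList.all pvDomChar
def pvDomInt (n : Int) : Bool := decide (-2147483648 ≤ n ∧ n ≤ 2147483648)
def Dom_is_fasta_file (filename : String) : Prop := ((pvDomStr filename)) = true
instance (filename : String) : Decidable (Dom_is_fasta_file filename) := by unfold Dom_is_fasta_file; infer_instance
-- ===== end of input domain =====

-- B strips at most one compression suffix and then tests the 3 plain FASTA extensions,
-- replacing A's flat any() over the 12-element extension × compression cross product (objective: simpler).

-- ===== PORT A =====
def is_fasta_file (filename : String) : Bool :=
  if ([".fa", ".fasta", ".fna"] ++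
      [".fa.gz", ".fasta.gz", ".fna.gz",
       ".fa.bz2", ".fasta.bz2", ".fna.bz2",
       ".fa.zip", ".fasta.zip", ".fna.zip"]).any
        (fun ext => PySem.Str.endswith filename ext) then
    true
  else
    false

-- ===== PORT B =====
-- the for-loop over ('.gz','.bz2','.zip') with break, unrolled over its 3 literal elements
def is_fasta_file_alt (filename : String) : Bool :=
  let base :=
    if PySem.Str.endswith filename ".gz" then PySem.Str.slice filename none (some (-3))
    else if PySem.Str.endswith filename ".bz2" then PySem.Str.slice filename none (some (-4))
    else if PySem.Str.endswith filename ".zip" then PySem.Str.slice filename none (some (-4))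
    else filename
  [".fa", ".fasta", ".fna"].any (fun ext => PySem.Str.endswith base ext)

-- ===== PRECONDITION & SPEC =====
def Spec_is_fasta_file (filename : String) (out : Bool) : Prop := out = is_fasta_file_alt filename
instance (filename : String) (out : Bool) : Decidable (Spec_is_fasta_file filename out) := by unfold Spec_is_fasta_file; infer_instance

-- ===== CLAIM (what is proved, stated in full; the proofs are below) =====
def Claim_equal_is_fasta_file : Prop := ∀ (filename : String), Dom_is_fasta_file filename → Spec_is_fasta_file filename (is_fasta_file filename)

-- ===== LEMMAS AND PROOFS =====

theorem pv_suffix_append_iff (e c s : List Char) :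
    e ++ c <:+ s ↔ c <:+ s ∧ e <:+ s.take (s.length - c.length) := by
  constructor
  · rintro ⟨t, rfl⟩
    refine ⟨⟨t ++ e, by simp⟩, ?_⟩
    have h1 : (t ++ (e ++ c)).length - c.length = (t ++ e).length := by simp; omega
    rw [h1, show t ++ (e ++ c) = (t ++ e) ++ c by simp, List.take_left]
    exact ⟨t, rfl⟩
  · rintro ⟨⟨u, hu⟩, he⟩
    subst hu
    have h1 : (u ++ c).length - c.length = u.length := by simp
    rw [h1, List.take_left] at he
    obtain ⟨v, rfl⟩ := he
    exact ⟨v, by simp⟩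

theorem pv_endswith_append (s e c : List Char) :
    PySem.Chars.endswith s (e ++ c)
      = (PySem.Chars.endswith s c && PySem.Chars.endswith (s.take (s.length - c.length)) e) := by
  rw [Bool.eq_iff_iff]
  simp only [Bool.and_eq_true, PySem.Chars.endswith_iff]
  exact pv_suffix_append_iff e c s

theorem pv_getLast?_of_suffix {s p : List Char} (h : p <:+ s) (hp : p ≠ []) :
    s.getLast? = p.getLast? := by
  obtain ⟨t, rfl⟩ := h
  exact List.getLast?_append_of_ne_nil _ hp

theorem pv_endswith_false (s q : List Char) (c : Char) (hs : s.getLast? = some c)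
    (hq0 : q ≠ []) (hq : q.getLast? ≠ some c) : PySem.Chars.endswith s q = false := by
  cases h : PySem.Chars.endswith s q
  · rfl
  · exfalso
    have hsuf := (PySem.Chars.endswith_iff s q).mp h
    have := pv_getLast?_of_suffix hsuf hq0
    rw [hs] at this
    exact hq this.symm

theorem pv_last_of_endswith (s q : List Char) (c : Char)
    (hq : q.getLast? = some c) (h : PySem.Chars.endswith s q = true) :
    s.getLast? = some c := by
  have hsuf := (PySem.Chars.endswith_iff s q).mp h
  have hq0 : q ≠ [] := by rintro rfl; simp at hq
  rw [pv_getLast?_of_suffix hsuf hq0, hq]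

-- ===== VERDICT (by name: the statement is the Claim_ definition above) =====
theorem is_fasta_file_spec : Claim_equal_is_fasta_file := by
  intro f _
  unfold Spec_is_fasta_file is_fasta_file is_fasta_file_alt
  simp only [List.cons_append, List.nil_append, List.any_cons, List.any_nil,
    PySem.Str.endswith_eq, Bool.or_false]
  rw [show (".fa.gz" : String).toList = ".fa".toList ++ ".gz".toList from rfl,
      show (".fasta.gz" : String).toList = ".fasta".toList ++ ".gz".toList from rfl,
      show (".fna.gz" : String).toList = ".fna".toList ++ ".gz".toList from rfl,
      show (".fa.bz2" : String).toList = ".fa".toList ++ ".bz2".toList from rfl,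
      show (".fasta.bz2" : String).toList = ".fasta".toList ++ ".bz2".toList from rfl,
      show (".fna.bz2" : String).toList = ".fna".toList ++ ".bz2".toList from rfl,
      show (".fa.zip" : String).toList = ".fa".toList ++ ".zip".toList from rfl,
      show (".fasta.zip" : String).toList = ".fasta".toList ++ ".zip".toList from rfl,
      show (".fna.zip" : String).toList = ".fna".toList ++ ".zip".toList from rfl]
  simp only [pv_endswith_append]
  simp only [show (".fa" : String).toList = ['.', 'f', 'a'] from rfl,
      show (".fasta" : String).toList = ['.', 'f', 'a', 's', 't', 'a'] from rfl,
      show (".fna" : String).toList = ['.', 'f', 'n', 'a'] from rfl,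
      show (".gz" : String).toList = ['.', 'g', 'z'] from rfl,
      show (".bz2" : String).toList = ['.', 'b', 'z', '2'] from rfl,
      show (".zip" : String).toList = ['.', 'z', 'i', 'p'] from rfl,
      List.length_cons, List.length_nil]
  have hslice3 : (PySem.Str.slice f none (some (-3))).toList
      = List.take (f.toList.length - 3) f.toList := by
    rw [PySem.Str.toList_slice]
    simp only [PySem.Chars.slice]
    rw [PySem.List.slice_to_neg_ofNat _ 3 (by omega)]
  have hslice4 : (PySem.Str.slice f none (some (-4))).toList
      = List.take (f.toList.length - 4) f.toList := by
    rw [PySem.Str.toList_slice]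
    simp only [PySem.Chars.slice]
    rw [PySem.List.slice_to_neg_ofNat _ 4 (by omega)]
  by_cases hgz : PySem.Chars.endswith f.toList ['.', 'g', 'z'] = true
  · have hz := pv_last_of_endswith f.toList _ 'z' (by decide) hgz
    simp only [pv_endswith_false f.toList ['.', 'f', 'a'] 'z' hz (by decide) (by decide),
        pv_endswith_false f.toList ['.', 'f', 'a', 's', 't', 'a'] 'z' hz (by decide) (by decide),
        pv_endswith_false f.toList ['.', 'f', 'n', 'a'] 'z' hz (by decide) (by decide),
        pv_endswith_false f.toList ['.', 'b', 'z', '2'] 'z' hz (by decide) (by decide),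
        pv_endswith_false f.toList ['.', 'z', 'i', 'p'] 'z' hz (by decide) (by decide)]
    simp [hgz, hslice3]
  · by_cases hbz : PySem.Chars.endswith f.toList ['.', 'b', 'z', '2'] = true
    · have h2 := pv_last_of_endswith f.toList _ '2' (by decide) hbz
      simp only [pv_endswith_false f.toList ['.', 'f', 'a'] '2' h2 (by decide) (by decide),
          pv_endswith_false f.toList ['.', 'f', 'a', 's', 't', 'a'] '2' h2 (by decide) (by decide),
          pv_endswith_false f.toList ['.', 'f', 'n', 'a'] '2' h2 (by decide) (by decide),
          pv_endswith_false f.toList ['.', 'z', 'i', 'p'] '2' h2 (by decide) (by decide)]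
      simp [hgz, hbz, hslice4]
    · by_cases hzip : PySem.Chars.endswith f.toList ['.', 'z', 'i', 'p'] = true
      · have hp := pv_last_of_endswith f.toList _ 'p' (by decide) hzip
        simp only [pv_endswith_false f.toList ['.', 'f', 'a'] 'p' hp (by decide) (by decide),
            pv_endswith_false f.toList ['.', 'f', 'a', 's', 't', 'a'] 'p' hp (by decide) (by decide),
            pv_endswith_false f.toList ['.', 'f', 'n', 'a'] 'p' hp (by decide) (by decide)]
        simp [hgz, hbz, hzip, hslice4]
      · simp [hgz, hbz, hzip]
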